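-- pv_equiv track=rewrite | github.com/alazarlemma02/A2SV | A2SV Remote Education Contest #2 10-Feb-2025/C - Sura loves coding 254383.py | sureLovesCoding
-- ===== SOURCE A (Python) =====
-- def sureLovesCoding(n, s):
--     res = ""
--     count = n
--     for char in s:
--         if count % 2 ==0:
--             res = char + res
--         else:
--             res += char
--         count -=1
--     return res
-- ===== SOURCE B (Python) =====
-- def sureLovesCoding(n, s):
--     pre = [c for i, c in enumerate(s) if (n - i) % 2 == 0]
--     app = [c for i, c in enumerate(s) if (n - i) % 2 != 0]
--     return ''.join(reversed(pre)) + ''.join(app)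
-- ===== Notes on version B (the rewrite author's own statement) =====
-- stated objective: faster
-- what changed: Replaces the sequential prepend/append string mutation by a closed partition: two parity filters over enumerate(s) plus one reversal of the front part, concatenated once.
import Mathlib
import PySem

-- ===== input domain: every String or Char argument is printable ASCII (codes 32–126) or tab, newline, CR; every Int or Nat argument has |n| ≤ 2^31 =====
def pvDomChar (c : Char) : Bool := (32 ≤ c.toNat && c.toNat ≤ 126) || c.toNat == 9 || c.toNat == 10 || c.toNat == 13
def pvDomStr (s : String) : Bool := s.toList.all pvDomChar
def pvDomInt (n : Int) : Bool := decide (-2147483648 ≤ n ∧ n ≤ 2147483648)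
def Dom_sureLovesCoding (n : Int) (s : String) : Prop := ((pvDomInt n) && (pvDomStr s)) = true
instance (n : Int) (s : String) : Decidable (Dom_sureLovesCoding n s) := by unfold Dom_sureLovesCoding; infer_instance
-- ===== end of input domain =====

-- B builds the result as a one-shot partition (parity filters over enumerate + one reversal) instead of A's
-- character-by-character prepend/append accumulation; equivalence is proved for all inputs (no Pre_ needed).

-- ===== PORT A =====
-- the for-loop over s with state (res, count); branch order and updates as in A
def pvLoopA (res : List Char) (count : Int) : List Char → List Char
  | [] => res
  | c :: cs =>
    if PySem.Int.mod count 2 = 0 then pvLoopA (c :: res) (count - 1) cs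
    else pvLoopA (res ++ [c]) (count - 1) cs

def sureLovesCoding (n : Int) (s : String) : String :=
  String.ofList (pvLoopA [] n s.toList)

-- ===== PORT B =====
def sureLovesCoding_alt (n : Int) (s : String) : String :=
  let pre := ((PySem.List.enumerate s.toList).filter
      (fun p => PySem.Int.mod (n - p.1) 2 == 0)).map Prod.snd
  let app := ((PySem.List.enumerate s.toList).filter
      (fun p => !(PySem.Int.mod (n - p.1) 2 == 0))).map Prod.snd
  String.ofList (pre.reverse ++ app)

-- ===== PRECONDITION & SPEC =====
def Spec_sureLovesCoding (n : Int) (s : String) (out : String) : Prop := out = sureLovesCoding_alt n s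
instance (n : Int) (s : String) (out : String) : Decidable (Spec_sureLovesCoding n s out) := by unfold Spec_sureLovesCoding; infer_instance

-- ===== CLAIM (what is proved, stated in full; the proofs are below) =====
def Claim_equal_sureLovesCoding : Prop := ∀ (n : Int) (s : String), Dom_sureLovesCoding n s → Spec_sureLovesCoding n s (sureLovesCoding n s)

-- ===== LEMMAS AND PROOFS =====

-- the parity partition of cs with a counter starting at `count`
def pvPre (count : Int) : List Char → List Char
  | [] => []
  | c :: cs => if PySem.Int.mod count 2 = 0 then c :: pvPre (count - 1) cs else pvPre (count - 1) cs

def pvApp (count : Int) : List Char → List Char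
  | [] => []
  | c :: cs => if PySem.Int.mod count 2 = 0 then pvApp (count - 1) cs else c :: pvApp (count - 1) cs

theorem pvLoopA_char (cs : List Char) : ∀ (count : Int) (res : List Char),
    pvLoopA res count cs = (pvPre count cs).reverse ++ res ++ pvApp count cs := by
  induction cs with
  | nil => intro count res; simp [pvLoopA, pvPre, pvApp]
  | cons c cs ih =>
    intro count res
    by_cases h : (2:Int) ∣ count <;>
      simp [pvLoopA, pvPre, pvApp, h, ih]

theorem pvEnum_pre (cs : List Char) : ∀ (n k : Int),
    ((PySem.List.enumerate cs k).filter (fun p => PySem.Int.mod (n - p.1) 2 == 0)).map Prod.snd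
      = pvPre (n - k) cs := by
  induction cs with
  | nil => intro n k; simp [PySem.List.enumerate, pvPre]
  | cons c cs ih =>
    intro n k
    have ih' := ih n (k + 1)
    rw [show n - (k + 1) = n - k - 1 by ring] at ih'
    by_cases h : (2:Int) ∣ (n - k) <;>
      simp [PySem.List.enumerate, pvPre, h] <;> simpa using ih'

theorem pvEnum_app (cs : List Char) : ∀ (n k : Int),
    ((PySem.List.enumerate cs k).filter (fun p => !(PySem.Int.mod (n - p.1) 2 == 0))).map Prod.snd
      = pvApp (n - k) cs := by
  induction cs with
  | nil => intro n k; simp [PySem.List.enumerate, pvApp]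
  | cons c cs ih =>
    intro n k
    have ih' := ih n (k + 1)
    rw [show n - (k + 1) = n - k - 1 by ring] at ih'
    by_cases h : (2:Int) ∣ (n - k) <;>
      simp [PySem.List.enumerate, pvApp, h] <;> simpa using ih'

-- ===== VERDICT (by name: the statement is the Claim_ definition above) =====
theorem sureLovesCoding_spec : Claim_equal_sureLovesCoding := by
  intro n s _
  unfold Spec_sureLovesCoding sureLovesCoding sureLovesCoding_alt
  have hp := pvEnum_pre s.toList n 0
  have ha := pvEnum_app s.toList n 0
  simp only [sub_zero] at hp ha
  rw [pvLoopA_char, hp, ha]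
  simp
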